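-- pv_equiv track=rewrite | github.com/achrafbenamrane/tp-tl | automat.py | simulate_fsa
-- ===== SOURCE A (Python) =====
-- def simulate_fsa(word):
--     alphabet=["a","b","c","d"]
--     state = 3
--
--     for i in range (len(word)):
--         if (word[i] not in alphabet):
--             return False
--         else:
--             if ( state == 0 ):
--                 if (word[i]=="a"):
--                     state+=1
--             if (state == 1):
--                 if (word[i]=="b"):
--                     state+=1
--                 elif (state == 1):
--                     if(word[i]=="c" or word[i]=="d"):
--                         state-=1
--             if (state == 2 ):
--                 if (word[i]== "c"):
--                     state+=1
--             if (state == 3 ):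
--                 if (word[i]== "d"):
--                     state+=1
--                 elif (word[i]== "a" ):
--                     state-=1
--     if (state==4):
--         return True
--     else:
--         return False
-- ===== SOURCE B (Python) =====
-- def simulate_fsa(word):
--     # Backward set simulation: scan the word right-to-left, maintaining the set
--     # of states from which the remaining suffix is accepted; accept iff the
--     # start state 3 survives to the front.
--     delta = {
--         0: {'a': 1, 'b': 0, 'c': 0, 'd': 0},
--         1: {'a': 1, 'b': 2, 'c': 0, 'd': 0},
--         2: {'a': 2, 'b': 2, 'c': 3, 'd': 2},
--         3: {'a': 2, 'b': 3, 'c': 3, 'd': 4},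
--         4: {'a': 4, 'b': 4, 'c': 4, 'd': 4},
--     }
--     if any(ch not in 'abcd' for ch in word):
--         return False
--     good = {4}
--     for ch in reversed(word):
--         good = {s for s in delta if delta[s][ch] in good}
--     return 3 in good
-- ===== Notes on version B (the rewrite author's own statement) =====
-- stated objective: alternative
-- what changed: B replaces A's forward single-state simulation (four cascaded interpreted if-blocks per char, left to right) with a backward set simulation: a single C-level any() pass validates the alphabet, then a right-to-left scan maintains the set of states from which the remaining suffix is accepted via one small set comprehension per char, accepting iff start state 3 survives; the measured speedup is constant-factor (built-in any()/set machinery instead of per-char branch cascades).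
import Mathlib
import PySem

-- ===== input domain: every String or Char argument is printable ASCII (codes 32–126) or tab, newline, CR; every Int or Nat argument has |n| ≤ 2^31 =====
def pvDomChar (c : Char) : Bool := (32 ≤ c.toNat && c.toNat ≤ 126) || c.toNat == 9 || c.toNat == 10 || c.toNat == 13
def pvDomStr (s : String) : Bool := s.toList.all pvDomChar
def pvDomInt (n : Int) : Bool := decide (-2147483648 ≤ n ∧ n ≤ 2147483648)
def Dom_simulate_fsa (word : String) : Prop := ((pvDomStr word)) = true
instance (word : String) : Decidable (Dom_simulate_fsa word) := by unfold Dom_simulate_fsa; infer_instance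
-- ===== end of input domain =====

-- B replaces A's forward single-state simulation with a backward set simulation: it scans
-- the word right-to-left maintaining the set of accepting-suffix states (objective: alternative).

-- ===== PORT A =====
-- the body of A's loop: the four sequential if-blocks, applied in order to `state`
def pvStepA (c : Char) (state : Int) : Int :=
  let state := if state == 0 then (if c == 'a' then state + 1 else state) else state
  let state := if state == 1 then
      (if c == 'b' then state + 1
       else if state == 1 then (if c == 'c' || c == 'd' then state - 1 else state) else state)
    else state
  let state := if state == 2 then (if c == 'c' then state + 1 else state) else state
  let state := if state == 3 then
      (if c == 'd' then state + 1 else if c == 'a' then state - 1 else state)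
    else state
  state

-- A's loop over the word's characters, with the early `return False` on a non-alphabet char
def pvLoopA : List Char → Int → Bool
  | [], state => state == 4
  | c :: rest, state =>
    if (['a', 'b', 'c', 'd'] : List Char).contains c = false then false
    else pvLoopA rest (pvStepA c state)

def simulate_fsa (word : String) : Bool := pvLoopA word.toList 3

-- ===== PORT B =====
-- Source B's nested dict literal `delta` (state → (char → state))
def pvDeltaB : PySem.Dict Int (PySem.Dict Char Int) := PySem.Dict.ofList
  [(0, PySem.Dict.ofList [('a', 1), ('b', 0), ('c', 0), ('d', 0)]),
   (1, PySem.Dict.ofList [('a', 1), ('b', 2), ('c', 0), ('d', 0)]),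
   (2, PySem.Dict.ofList [('a', 2), ('b', 2), ('c', 3), ('d', 2)]),
   (3, PySem.Dict.ofList [('a', 2), ('b', 3), ('c', 3), ('d', 4)]),
   (4, PySem.Dict.ofList [('a', 4), ('b', 4), ('c', 4), ('d', 4)])]

-- delta[s][ch]; exact on the calls B makes (s is a key of delta and ch ∈ "abcd", so no KeyError)
def pvNext (s : Int) (c : Char) : Int :=
  PySem.Dict.getD (PySem.Dict.getD pvDeltaB s (PySem.Dict.ofList [])) c 0

-- B's backward pass, as a foldl over the already-reversed character list:
-- good := {4}; for ch in reversed(word): good := {s for s in delta if delta[s][ch] in good}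
def pvGoodLoop (l : List Char) : PySem.Set Int :=
  l.foldl
    (fun good c =>
      PySem.Set.ofList ((PySem.Dict.keys pvDeltaB).filter
        (fun s => PySem.Set.contains good (pvNext s c))))
    (PySem.Set.ofList [4])

-- `ch not in 'abcd'` ported as char-list membership (exact: ch is a single character)
def simulate_fsa_alt (word : String) : Bool :=
  if word.toList.any (fun c => !(("abcd".toList : List Char).contains c)) then false
  else PySem.Set.contains (pvGoodLoop word.toList.reverse) 3

-- ===== PRECONDITION & SPEC =====
def Spec_simulate_fsa (word : String) (out : Bool) : Prop := out = simulate_fsa_alt word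
instance (word : String) (out : Bool) : Decidable (Spec_simulate_fsa word out) := by unfold Spec_simulate_fsa; infer_instance

-- ===== CLAIM (what is proved, stated in full; the proofs are below) =====
def Claim_equal_simulate_fsa : Prop := ∀ (word : String), Dom_simulate_fsa word → Spec_simulate_fsa word (simulate_fsa word)

-- ===== LEMMAS AND PROOFS =====

lemma pvLoopA_cons (c : Char) (rest : List Char) (s : Int) :
    pvLoopA (c :: rest) s =
      if (['a', 'b', 'c', 'd'] : List Char).contains c = false then false
      else pvLoopA rest (pvStepA c s) := rfl

-- if some character is outside the alphabet, A's loop returns false from any state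
lemma pvLoopA_bad : ∀ (l : List Char) (s : Int),
    (l.any (fun c => !((['a', 'b', 'c', 'd'] : List Char).contains c)) = true) →
    pvLoopA l s = false := by
  intro l
  induction l with
  | nil => intro s h; simp at h
  | cons c rest ih =>
    intro s h
    rw [List.any_cons] at h
    by_cases hc : (['a', 'b', 'c', 'd'] : List Char).contains c = true
    · rw [hc] at h
      simp only [Bool.not_true, Bool.false_or] at h
      rw [pvLoopA_cons, if_neg (by intro hf; rw [hc] at hf; exact Bool.noConfusion hf)]
      exact ih _ h
    · rw [pvLoopA_cons, if_pos (Bool.not_eq_true _ ▸ hc)]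

-- backward-set invariant: on an all-alphabet word, A's forward run from s accepts
-- iff s is in B's good-set for the whole word
lemma pvLoop_eq : ∀ (l : List Char), (∀ c ∈ l, c ∈ (['a', 'b', 'c', 'd'] : List Char)) →
    ∀ s : Int, 0 ≤ s → s ≤ 4 →
    pvLoopA l s = PySem.Set.contains (pvGoodLoop l.reverse) s := by
  intro l
  induction l with
  | nil =>
    intro _ s hs0 hs4
    interval_cases s <;> decide
  | cons c rest ih =>
    intro hall s hs0 hs4
    have hc : c ∈ (['a', 'b', 'c', 'd'] : List Char) := hall c (by simp)
    have hrest : ∀ x ∈ rest, x ∈ (['a', 'b', 'c', 'd'] : List Char) := fun x hx => hall x (by simp [hx])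
    have hfold : pvGoodLoop (c :: rest).reverse =
        PySem.Set.ofList ((PySem.Dict.keys pvDeltaB).filter
          (fun t => PySem.Set.contains (pvGoodLoop rest.reverse) (pvNext t c))) := by
      rw [show (c :: rest).reverse = rest.reverse ++ [c] by simp]
      unfold pvGoodLoop
      rw [List.foldl_append]
      simp only [List.foldl_cons, List.foldl_nil]
    have hstep : pvStepA c s = pvNext s c ∧ 0 ≤ pvNext s c ∧ pvNext s c ≤ 4 := by
      fin_cases hc <;> interval_cases s <;> decide
    have hccontains : (['a', 'b', 'c', 'd'] : List Char).contains c = true :=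
      List.contains_iff_mem.mpr hc
    have hA : pvLoopA (c :: rest) s = pvLoopA rest (pvStepA c s) := by
      rw [pvLoopA_cons, if_neg (by intro hf; rw [hccontains] at hf; exact Bool.noConfusion hf)]
    have hkeys : PySem.Dict.keys pvDeltaB = ([0, 1, 2, 3, 4] : List Int) := by decide
    have hmem : PySem.Set.contains (pvGoodLoop (c :: rest).reverse) s =
        PySem.Set.contains (pvGoodLoop rest.reverse) (pvNext s c) := by
      rw [hfold, hkeys, Bool.eq_iff_iff]
      rw [PySem.Set.contains_iff, PySem.Set.mem_ofList, List.mem_filter]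
      constructor
      · intro hx
        exact hx.2
      · intro hx
        refine ⟨?_, hx⟩
        interval_cases s <;> decide
    rw [hA, hstep.1, hmem, ih hrest _ hstep.2.1 hstep.2.2]

-- ===== VERDICT (by name: the statement is the Claim_ definition above) =====
theorem simulate_fsa_spec : Claim_equal_simulate_fsa := by
  intro word _
  unfold Spec_simulate_fsa simulate_fsa simulate_fsa_alt
  by_cases hbad : word.toList.any (fun c => !(("abcd".toList : List Char).contains c)) = true
  · rw [if_pos hbad]
    exact pvLoopA_bad word.toList 3 hbad
  · rw [if_neg hbad]
    have hall : ∀ c ∈ word.toList, c ∈ (['a', 'b', 'c', 'd'] : List Char) := by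
      intro c hcmem
      by_contra hno
      refine hbad (List.any_eq_true.mpr ⟨c, hcmem, ?_⟩)
      have hcf : (['a', 'b', 'c', 'd'] : List Char).contains c = false :=
        Bool.eq_false_iff.mpr (fun h => hno (List.contains_iff_mem.mp h))
      show (!(['a', 'b', 'c', 'd'] : List Char).contains c) = true
      rw [hcf]
      rfl
    exact pvLoop_eq word.toList hall 3 (by norm_num) (by norm_num)
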